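-- pv_equiv track=rewrite | github.com/nazmulcuet11/acm | InterviewBit/arrays/find-permutation.py | findPerm
-- ===== SOURCE A (Python) =====
-- def findPerm(A, B):
--     x = 1
--     ans = []
--     for char in A:
--         if char == 'I':
--             ans.append(x)
--             x += 1
--         else:
--             ans.append(B)
--             B -= 1
--     ans.append(x)
--     return ans
-- ===== SOURCE B (Python) =====
-- def findPerm(A, B):
--     # prefix-count array: pre[i] = number of 'I' in A[:i]
--     pre = [0]
--     for ch in A:
--         pre.append(pre[-1] + (ch == 'I'))
--     n = len(A)
--     # closed form per index: an 'I' slot is the (pre[i]+1)-th increasing value;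
--     # a non-'I' slot is the (i-pre[i])-th decreasing value from B
--     return [pre[i] + 1 if A[i] == 'I' else B - (i - pre[i]) for i in range(n)] + [pre[n] + 1]
-- ===== Notes on version B (the rewrite author's own statement) =====
-- stated objective: alternative
-- what changed: Replaces the stateful interleaved loop (running low/high counters mutated as the list is appended) with a precomputed prefix-count array of 'I's and a per-index closed-form arithmetic formula: slot i gets pre[i]+1 if 'I' else B-(i-pre[i]).
import Mathlib
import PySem

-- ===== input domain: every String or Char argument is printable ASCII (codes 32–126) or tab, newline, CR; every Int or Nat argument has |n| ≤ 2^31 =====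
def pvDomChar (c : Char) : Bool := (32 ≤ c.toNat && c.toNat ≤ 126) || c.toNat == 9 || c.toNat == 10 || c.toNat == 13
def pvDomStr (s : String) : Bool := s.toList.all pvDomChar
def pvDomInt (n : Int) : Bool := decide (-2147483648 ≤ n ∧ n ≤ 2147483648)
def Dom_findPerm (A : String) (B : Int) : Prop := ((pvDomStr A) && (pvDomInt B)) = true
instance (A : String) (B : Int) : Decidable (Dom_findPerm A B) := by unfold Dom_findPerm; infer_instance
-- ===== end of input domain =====

-- B replaces A's stateful interleaved loop with a prefix-count array and a per-index closed-form formula (alternative decomposition).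
-- ===== PORT A =====
def findPermAux : List Char → Int → Int → List Int
  | [], x, _ => [x]
  | c :: cs, x, b =>
    if c = 'I' then x :: findPermAux cs (x + 1) b
    else b :: findPermAux cs x (b - 1)

def findPerm (A : String) (B : Int) : List Int := findPermAux A.toList 1 B

-- ===== PORT B =====
-- pre = [0]; for ch in A: pre.append(pre[-1] + (ch == 'I'))
def fpPre (cs : List Char) : List Int :=
  cs.foldl (fun p c => p ++ [p.getLastD 0 + (if c = 'I' then 1 else 0)]) [0]

def findPerm_alt (A : String) (B : Int) : List Int :=
  let cs := A.toList
  let n := cs.length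
  let pre := fpPre cs
  ((List.range n).map (fun i =>
      if cs[i]? = some 'I' then pre.getD i 0 + 1
      else B - ((i : Int) - pre.getD i 0)))
    ++ [pre.getD n 0 + 1]

-- ===== PRECONDITION & SPEC =====
def Spec_findPerm (A : String) (B : Int) (out : List Int) : Prop := out = findPerm_alt A B
instance (A : String) (B : Int) (out : List Int) : Decidable (Spec_findPerm A B out) := by unfold Spec_findPerm; infer_instance

-- ===== CLAIM (what is proved, stated in full; the proofs are below) =====
def Claim_equal_findPerm : Prop := ∀ (A : String) (B : Int), Dom_findPerm A B → Spec_findPerm A B (findPerm A B)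

-- ===== LEMMAS AND PROOFS =====

-- proof-only: the tail of the prefix-count list when the count so far is v
def fpShifts : Int → List Char → List Int
  | _, [] => []
  | v, c :: cs =>
    let v' := v + (if c = 'I' then 1 else 0)
    v' :: fpShifts v' cs

lemma fpPre_fold (cs : List Char) (acc : List Int) (w : Int) :
    cs.foldl (fun p c => p ++ [p.getLastD 0 + (if c = 'I' then 1 else 0)]) (acc ++ [w])
      = (acc ++ [w]) ++ fpShifts w cs := by
  induction cs generalizing acc w with
  | nil => simp [fpShifts]
  | cons c cs ih =>
    rw [List.foldl_cons]
    have h1 : (acc ++ [w]).getLastD 0 = w := by simp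
    rw [h1]
    have h2 := ih (acc ++ [w]) (w + (if c = 'I' then 1 else 0))
    rw [h2]
    simp [fpShifts]

lemma fpPre_eq (cs : List Char) : fpPre cs = 0 :: fpShifts 0 cs := by
  have := fpPre_fold cs [] 0
  simpa [fpPre] using this

lemma fpMain (cs : List Char) (j v b : Int) :
    ((List.range cs.length).map (fun i =>
        if cs[i]? = some 'I' then (v :: fpShifts v cs).getD i 0 + 1
        else b - ((j + (i : Int)) - (v :: fpShifts v cs).getD i 0)))
      ++ [(v :: fpShifts v cs).getD cs.length 0 + 1]
    = findPermAux cs (v + 1) (b - (j - v)) := by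
  induction cs generalizing j v b with
  | nil => simp [findPermAux]
  | cons c cs ih =>
    have hs : fpShifts v (c :: cs)
        = (v + (if c = 'I' then 1 else 0)) :: fpShifts (v + (if c = 'I' then 1 else 0)) cs := by
      simp [fpShifts]
    by_cases hc : c = 'I'
    · subst hc
      simp only [if_pos rfl] at hs
      rw [hs, List.length_cons, List.range_succ_eq_map, List.map_cons, List.map_map,
        findPermAux, if_pos rfl]
      have ihj := ih (j + 1) (v + 1) b
      have hb : b - (j + 1 - (v + 1)) = b - (j - v) := by ring
      rw [hb] at ihj
      rw [← ihj]
      simp only [List.getElem?_cons_zero, List.getD_cons_zero, if_pos rfl, List.cons_append]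
      congr 1
      · congr 1
        apply List.map_congr_left
        intro i _
        simp only [Function.comp_apply, List.getElem?_cons_succ, List.getD_cons_succ]
        by_cases hci : cs[i]? = some 'I'
        · simp [hci]
        · simp only [hci, if_neg, reduceIte]
          push_cast
          ring
    · have hs2 : fpShifts v (c :: cs) = v :: fpShifts v cs := by
        simpa [hc] using hs
      rw [hs2, List.length_cons, List.range_succ_eq_map, List.map_cons, List.map_map,
        findPermAux, if_neg hc]
      have ihj := ih (j + 1) v b
      have hb : b - (j + 1 - v) = b - (j - v) - 1 := by ring
      rw [hb] at ihj
      rw [← ihj]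
      simp only [List.cons_append]
      congr 1
      · simp only [List.getElem?_cons_zero, List.getD_cons_zero]
        rw [if_neg (by simp [hc])]
        push_cast
        ring
      · congr 1
        apply List.map_congr_left
        intro i _
        simp only [Function.comp_apply, List.getElem?_cons_succ, List.getD_cons_succ]
        by_cases hci : cs[i]? = some 'I'
        · simp [hci]
        · simp only [hci, reduceIte]
          push_cast
          ring

-- ===== VERDICT (by name: the statement is the Claim_ definition above) =====
theorem findPerm_spec : Claim_equal_findPerm := by
  intro A B _
  unfold Spec_findPerm
  have h := fpMain A.toList 0 0 B
  simp only [zero_add, sub_self, sub_zero] at h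
  simp only [findPerm, findPerm_alt, fpPre_eq]
  rw [← h]
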